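-- pv_equiv track=rewrite | github.com/OCSPL-IT/oneSource | ERP_Reports/views.py | _norm_invoice_no
-- ===== SOURCE A (Python) =====
-- def _norm_invoice_no(s):
--     """Match SQL UDF: strip space, '/', '-', '.', ',' and uppercase."""
--     if s is None:
--         return None
--     t = str(s).upper()
--     for ch in (' ', '/', '-', '.', ','):
--         t = t.replace(ch, '')
--     t = t.strip()
--     return t or None
-- ===== SOURCE B (Python) =====
-- _DELETE = {' ', '/', '-', '.', ','}
--
-- def _norm_invoice_no(s):
--     """Match SQL UDF: strip space, '/', '-', '.', ',' and uppercase."""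
--     if s is None:
--         return None
--     t = str(s).upper()
--     cleaned = ''.join(c for c in t if c not in _DELETE)
--     return cleaned.strip() or None
-- ===== Notes on version B (the rewrite author's own statement) =====
-- stated objective: idiomatic
-- what changed: Replaces five sequential full-string .replace passes with a single membership-filtered traversal over the characters of the uppercased string.
import Mathlib
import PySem

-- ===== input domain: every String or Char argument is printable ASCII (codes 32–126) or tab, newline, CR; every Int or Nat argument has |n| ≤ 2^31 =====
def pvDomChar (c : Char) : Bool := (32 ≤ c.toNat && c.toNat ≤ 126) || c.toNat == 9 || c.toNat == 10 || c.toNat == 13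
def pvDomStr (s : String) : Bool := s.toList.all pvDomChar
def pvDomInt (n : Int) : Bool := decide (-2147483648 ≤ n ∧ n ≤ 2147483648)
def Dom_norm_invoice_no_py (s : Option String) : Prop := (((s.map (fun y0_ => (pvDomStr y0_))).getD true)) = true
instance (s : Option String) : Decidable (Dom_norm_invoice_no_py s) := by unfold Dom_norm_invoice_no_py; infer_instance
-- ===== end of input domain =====

-- B replaces A's five sequential full-string replace passes with one membership-filtered
-- traversal over the characters (objective: idiomatic single pass).

-- ===== PORT A =====
-- for ch in (' ', '/', '-', '.', ','): t = t.replace(ch, '')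
def norm_invoice_no_py (s : Option String) : Option String :=
  match s with
  | none => none
  | some s0 =>
    let t := PySem.Str.upper s0
    let t := [' ', '/', '-', '.', ','].foldl
      (fun t ch => PySem.Str.replace t (String.ofList [ch]) "") t
    let t := PySem.Str.strip t
    if t = "" then none else some t

-- ===== PORT B =====
def pvDelete : List Char := [' ', '/', '-', '.', ',']

def norm_invoice_no_py_alt (s : Option String) : Option String :=
  match s with
  | none => none
  | some s0 =>
    let t := PySem.Str.upper s0
    let cleaned := String.ofList (t.toList.filter (fun c => !(pvDelete.contains c)))
    let r := PySem.Str.strip cleaned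
    if r = "" then none else some r

-- ===== PRECONDITION & SPEC =====
def Spec_norm_invoice_no_py (s : Option String) (out : Option String) : Prop := out = norm_invoice_no_py_alt s
instance (s : Option String) (out : Option String) : Decidable (Spec_norm_invoice_no_py s out) := by unfold Spec_norm_invoice_no_py; infer_instance

-- ===== CLAIM (what is proved, stated in full; the proofs are below) =====
def Claim_equal_norm_invoice_no_py : Prop := ∀ (s : Option String), Dom_norm_invoice_no_py s → Spec_norm_invoice_no_py s (norm_invoice_no_py s)

-- ===== LEMMAS AND PROOFS =====

-- replacing one char by the empty string, with enough fuel, is filtering it out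
theorem replace_go_filter (ch : Char) (fuel : Nat) :
    ∀ (l acc : List Char), l.length ≤ fuel →
      PySem.Chars.replace.go [ch] [] fuel l acc
        = acc.reverse ++ l.filter (fun c => c ≠ ch) := by
  induction fuel with
  | zero =>
    intro l acc h
    have : l = [] := List.eq_nil_of_length_eq_zero (Nat.le_zero.mp h)
    subst this
    simp [PySem.Chars.replace.go]
  | succ n ih =>
    intro l acc h
    match l with
    | [] => simp [PySem.Chars.replace.go]
    | c :: t =>
      rw [PySem.Chars.replace.go]
      by_cases hc : c = ch
      · subst hc
        have hpre : [c].isPrefixOf (c :: t) = true := by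
          simp [List.isPrefixOf]
        rw [if_pos hpre]
        show PySem.Chars.replace.go [c] [] n (List.drop 1 (c :: t)) acc = _
        rw [List.drop_one, List.tail_cons, ih t acc (by simpa using Nat.le_of_succ_le_succ h)]
        simp
      · have hpre : [ch].isPrefixOf (c :: t) = false := by
          simp only [List.isPrefixOf, Bool.and_true]
          exact beq_eq_false_iff_ne.mpr (fun e => hc e.symm)
        rw [if_neg (by simp [hpre])]
        rw [ih t (c :: acc) (by simpa using Nat.le_of_succ_le_succ h)]
        simp [hc]

theorem replace_single (cs : List Char) (ch : Char) :
    PySem.Chars.replace cs [ch] [] = cs.filter (fun c => c ≠ ch) := by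
  rw [PySem.Chars.replace]
  simp only [List.isEmpty_cons]
  exact replace_go_filter ch cs.length cs [] (le_refl _)

theorem str_replace_single (s : String) (ch : Char) :
    (PySem.Str.replace s (String.ofList [ch]) "").toList
      = s.toList.filter (fun c => c ≠ ch) := by
  rw [PySem.Str.toList_replace]
  have h1 : (String.ofList [ch]).toList = [ch] := by simp
  have h2 : ("" : String).toList = [] := by simp
  rw [h1, h2]
  simpa using replace_single s.toList ch

theorem norm_invoice_no_py_spec : Claim_equal_norm_invoice_no_py := by
  intro s _
  unfold Spec_norm_invoice_no_py norm_invoice_no_py norm_invoice_no_py_alt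
  match s with
  | none => rfl
  | some s0 =>
    simp only []
    have key :
        ([' ', '/', '-', '.', ','].foldl
          (fun t ch => PySem.Str.replace t (String.ofList [ch]) "") (PySem.Str.upper s0))
        = String.ofList ((PySem.Str.upper s0).toList.filter (fun c => !(pvDelete.contains c))) := by
      apply String.toList_inj.mp
      simp only [List.foldl]
      rw [str_replace_single, str_replace_single, str_replace_single,
          str_replace_single, str_replace_single]
      have hr : (String.ofList ((PySem.Str.upper s0).toList.filter
          (fun c => !(pvDelete.contains c)))).toList
          = (PySem.Str.upper s0).toList.filter (fun c => !(pvDelete.contains c)) := by simp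
      rw [hr]
      simp only [List.filter_filter]
      apply List.filter_congr
      intro a _
      by_cases h1 : a = ' ' <;> by_cases h2 : a = '/' <;> by_cases h3 : a = '-' <;>
        by_cases h4 : a = '.' <;> by_cases h5 : a = ',' <;>
        simp [pvDelete, h1, h2, h3, h4, h5]
    rw [key]
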